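-- pv_equiv track=rewrite | github.com/robinandreeklund-collab/oneseekv1 | surfsense_backend/app/agents/new_chat/debate_helpers.py | resolve_winner
-- ===== SOURCE A (Python) =====
-- def resolve_winner(
--     vote_counts: dict[str, int],
--     word_counts: dict[str, int],
-- ) -> tuple[str, bool]:
--     """Resolve the winner, using word count as tiebreaker.
--
--     Returns (winner_name, tiebreaker_used).
--     """
--     if not vote_counts:
--         return ("", False)
--
--     max_votes = max(vote_counts.values())
--     tied = [m for m, v in vote_counts.items() if v == max_votes]
--
--     if len(tied) == 1:
--         return (tied[0], False)
--
--     # Tiebreaker: highest total word count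
--     winner = max(tied, key=lambda m: word_counts.get(m, 0))
--     return (winner, True)
-- ===== SOURCE B (Python) =====
-- def resolve_winner(
--     vote_counts: dict[str, int],
--     word_counts: dict[str, int],
-- ) -> tuple[str, bool]:
--     """Single-pass resolution: one fold tracks the current best (by votes,
--     then word count) and how many members share the top vote count."""
--     best_name = None
--     best_votes = 0
--     best_wc = 0
--     count_at_best = 0
--     for m, v in vote_counts.items():
--         w = word_counts.get(m, 0)
--         if best_name is None or v > best_votes:
--             best_name, best_votes, best_wc = m, v, w
--             count_at_best = 1
--         elif v == best_votes:
--             count_at_best += 1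
--             if w > best_wc:
--                 best_name, best_wc = m, w
--     if best_name is None:
--         return ("", False)
--     return (best_name, count_at_best > 1)
-- ===== Notes on version B (the rewrite author's own statement) =====
-- stated objective: alternative
-- what changed: Replaced A's three scans (max of values, tied-list comprehension, keyed max over the tied list) by a single left-to-right pass that maintains the current best entry (votes first, word count as tiebreak, first-wins) together with a running count of entries sharing the top vote count.
import Mathlib
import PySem

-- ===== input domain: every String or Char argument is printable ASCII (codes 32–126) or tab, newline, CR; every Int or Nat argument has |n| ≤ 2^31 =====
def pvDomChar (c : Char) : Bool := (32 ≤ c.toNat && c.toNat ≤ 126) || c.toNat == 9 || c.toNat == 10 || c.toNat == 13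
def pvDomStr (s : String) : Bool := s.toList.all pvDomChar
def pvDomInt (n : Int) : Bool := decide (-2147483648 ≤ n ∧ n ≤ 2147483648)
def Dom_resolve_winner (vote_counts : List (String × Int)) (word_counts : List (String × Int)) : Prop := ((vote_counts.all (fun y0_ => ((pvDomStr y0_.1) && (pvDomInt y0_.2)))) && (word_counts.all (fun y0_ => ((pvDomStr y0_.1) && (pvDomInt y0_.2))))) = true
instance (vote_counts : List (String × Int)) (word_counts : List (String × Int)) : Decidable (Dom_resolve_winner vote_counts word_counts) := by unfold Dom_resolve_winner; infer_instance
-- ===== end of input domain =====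

-- B collapses A's three scans into one fold that tracks the best entry and the count at the top vote (alternative decomposition, same cost).


-- ===== PORT A =====
def resolve_winner (vote_counts : List (String × Int)) (word_counts : List (String × Int)) : String × Bool :=
  if vote_counts.isEmpty then ("", false)
  else
    match PySem.List.max? (vote_counts.map (fun p => p.2)) (fun v => v) with
    | none => ("", false)  -- unreachable: vote_counts nonempty
    | some max_votes =>
      let tied := (vote_counts.filter (fun p => p.2 == max_votes)).map (fun p => p.1)
      if tied.length == 1 then (tied.headD "", false)
      else
        match PySem.List.max? tied (fun m => PySem.Dict.getD ⟨word_counts⟩ m 0) with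
        | some winner => (winner, true)
        | none => ("", false)  -- unreachable: tied nonempty

-- ===== PORT B =====
def resolve_winner_alt (vote_counts : List (String × Int)) (word_counts : List (String × Int)) : String × Bool :=
  let st := vote_counts.foldl
    (fun (acc : Option (String × Int × Int) × Int) p =>
      let w := PySem.Dict.getD ⟨word_counts⟩ p.1 0
      match acc.1 with
      | none => (some (p.1, p.2, w), 1)
      | some (bm, bv, bw) =>
        if bv < p.2 then (some (p.1, p.2, w), 1)
        else if p.2 = bv then
          (if bw < w then some (p.1, p.2, w) else some (bm, bv, bw), acc.2 + 1)
        else (some (bm, bv, bw), acc.2))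
    (none, 0)
  match st.1 with
  | none => ("", false)
  | some (bm, _, _) => (bm, decide (1 < st.2))

-- ===== PRECONDITION & SPEC =====
def Spec_resolve_winner (vote_counts : List (String × Int)) (word_counts : List (String × Int)) (out : String × Bool) : Prop := out = resolve_winner_alt vote_counts word_counts
instance (vote_counts : List (String × Int)) (word_counts : List (String × Int)) (out : String × Bool) : Decidable (Spec_resolve_winner vote_counts word_counts out) := by unfold Spec_resolve_winner; infer_instance

-- ===== CLAIM (what is proved, stated in full; the proofs are below) =====
def Claim_equal_resolve_winner : Prop := ∀ (vote_counts : List (String × Int)) (word_counts : List (String × Int)), Dom_resolve_winner vote_counts word_counts → Spec_resolve_winner vote_counts word_counts (resolve_winner vote_counts word_counts)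

-- ===== LEMMAS AND PROOFS =====

-- ===== VERDICT (by name: the statement is the Claim_ definition above) =====

def pvStep (word_counts : List (String × Int)) :
    (Option (String × Int × Int) × Int) → (String × Int) → (Option (String × Int × Int) × Int) :=
  fun acc p =>
    let w := PySem.Dict.getD ⟨word_counts⟩ p.1 0
    match acc.1 with
    | none => (some (p.1, p.2, w), 1)
    | some (bm, bv, bw) =>
      if bv < p.2 then (some (p.1, p.2, w), 1)
      else if p.2 = bv then
        (if bw < w then some (p.1, p.2, w) else some (bm, bv, bw), acc.2 + 1)
      else (some (bm, bv, bw), acc.2)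

theorem alt_eq_fold (vote_counts word_counts : List (String × Int)) :
    resolve_winner_alt vote_counts word_counts =
      match (vote_counts.foldl (pvStep word_counts) (none, 0)).1 with
      | none => ("", false)
      | some (bm, _, _) => (bm, decide (1 < (vote_counts.foldl (pvStep word_counts) (none, 0)).2)) := rfl

-- Python max keeps the FIRST extremal element; on a snoc the last element wins only strictly.
theorem max?_snoc_some {α κ : Type} [LT κ] [DecidableLT κ] (xs : List α) (y : α) (key : α → κ)
    {m : α} (h : PySem.List.max? xs key = some m) :
    PySem.List.max? (xs ++ [y]) key = some (if key m < key y then y else m) := by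
  have h' := h
  simp only [PySem.List.max?] at h' ⊢
  rw [List.foldl_append, h', List.foldl_cons, List.foldl_nil]
  show (if key m < key y then some y else some m) = some (if key m < key y then y else m)
  split <;> rfl

-- Single-pass characterisation: the fold's state is (A's winner, the max vote, its word count)
-- together with the number of entries holding the max vote.
theorem fold_char (word_counts : List (String × Int)) (l : List (String × Int)) (hl : l ≠ []) :
    ∃ M W, PySem.List.max? (l.map (fun p => p.2)) (fun v => v) = some M ∧
      PySem.List.max? ((l.filter (fun p => p.2 == M)).map (fun p => p.1))
        (fun m => PySem.Dict.getD ⟨word_counts⟩ m 0) = some W ∧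
      l.foldl (pvStep word_counts) (none, 0) =
        (some (W, M, PySem.Dict.getD ⟨word_counts⟩ W 0),
         ((l.filter (fun p => p.2 == M)).length : Int)) := by
  induction l using List.reverseRecOn with
  | nil => exact absurd rfl hl
  | append_singleton l q ih =>
    rcases eq_or_ne l [] with rfl | hne
    · refine ⟨q.2, q.1, ?_, ?_, ?_⟩ <;>
        simp [PySem.List.max?, pvStep]
    · obtain ⟨M, W, hM, hW, hfold⟩ := ih hne
      have hmax := PySem.List.max?_isMax hM
      have hM' : PySem.List.max? (List.map (fun p => p.2) l ++ [q.2]) (fun v => v)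
          = some (if M < q.2 then q.2 else M) := max?_snoc_some _ _ _ hM
      simp only [List.map_append, List.map_cons, List.map_nil]
      rw [hM']
      rw [List.foldl_append, hfold, List.foldl_cons, List.foldl_nil]
      by_cases h1 : M < q.2
      · -- q is a new strict maximum: everything resets to q
        have hfl : l.filter (fun p => p.2 == q.2) = [] := by
          rw [List.filter_eq_nil_iff]
          intro p hp
          have := hmax p.2 (List.mem_map_of_mem hp)
          simp only [beq_iff_eq]
          omega
        refine ⟨q.2, q.1, by simp [if_pos h1], ?_, ?_⟩
        · simp [List.filter_append, hfl, PySem.List.max?]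
        · simp [List.filter_append, hfl, pvStep, if_pos h1]
      · rw [if_neg h1]
        by_cases h2 : q.2 = M
        · -- q ties the maximum: count grows, winner updated on strictly larger word count
          have hfl : (l ++ [q]).filter (fun p => p.2 == M) =
              l.filter (fun p => p.2 == M) ++ [q] := by
            simp [List.filter_append, h2]
          have hW' : PySem.List.max?
              ((l.filter (fun p => p.2 == M)).map (fun p => p.1) ++ [q.1])
              (fun m => PySem.Dict.getD ⟨word_counts⟩ m 0)
              = some (if PySem.Dict.getD ⟨word_counts⟩ W 0 < PySem.Dict.getD ⟨word_counts⟩ q.1 0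
                      then q.1 else W) := max?_snoc_some _ _ _ hW
          refine ⟨M, if PySem.Dict.getD ⟨word_counts⟩ W 0 < PySem.Dict.getD ⟨word_counts⟩ q.1 0
                      then q.1 else W, rfl, ?_, ?_⟩
          · rw [hfl, List.map_append, List.map_cons, List.map_nil]
            exact hW'
          · rw [hfl]
            by_cases h3 : PySem.Dict.getD ⟨word_counts⟩ W 0 < PySem.Dict.getD ⟨word_counts⟩ q.1 0
            · simp [pvStep, h2, if_pos h3]
            · simp [pvStep, h2, if_neg h3]
        · -- q is below the maximum: state unchanged
          have hfl : (l ++ [q]).filter (fun p => p.2 == M) =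
              l.filter (fun p => p.2 == M) := by
            simp [List.filter_append, h2]
          refine ⟨M, W, rfl, by rw [hfl]; exact hW, ?_⟩
          rw [hfl]
          simp [pvStep, if_neg h1, h2]

theorem resolve_winner_spec : Claim_equal_resolve_winner := by
  intro vote_counts word_counts _
  unfold Spec_resolve_winner
  rcases eq_or_ne vote_counts [] with rfl | hne
  · rfl
  · obtain ⟨M, W, hM, hW, hfold⟩ := fold_char word_counts vote_counts hne
    rw [alt_eq_fold, hfold]
    unfold resolve_winner
    rw [if_neg (by simp [hne]), hM]
    have hmem := PySem.List.max?_mem hM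
    obtain ⟨p0, hp0, hp0v⟩ := List.mem_map.mp hmem
    have hpos : 0 < (vote_counts.filter (fun p => p.2 == M)).length :=
      List.length_pos_of_mem (List.mem_filter.mpr ⟨hp0, by simp [hp0v]⟩)
    by_cases hone : (vote_counts.filter (fun p => p.2 == M)).length = 1
    · rcases hl : vote_counts.filter (fun p => p.2 == M) with _ | ⟨p, rest⟩
      · rw [hl] at hone; simp at hone
      · have hrest : rest = [] := by
          rw [hl] at hone; simpa using hone
        subst hrest
        rw [hl] at hW
        have hWt : p.1 = W := by simpa [PySem.List.max?] using hW
        simp [hl, hWt]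
    · have h2 : 1 < (vote_counts.filter (fun p => p.2 == M)).length := by omega
      have hc : (1 : Int) < ((vote_counts.filter (fun p => p.2 == M)).length : Int) := by
        exact_mod_cast h2
      simp only []
      rw [if_neg (by simp [List.length_map, hone]), hW]
      simp [hc]
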